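-- pv_equiv track=rewrite | github.com/richardfearn/advent-of-code-2023 | day11/__init__.py | find_galaxy_distances
-- ===== SOURCE A (Python) =====
-- from heapq import heappop, heappush
--
-- def find_galaxy_distances(galaxies, empty_rows, empty_columns, scale_factor, width, height):
--     # pylint: disable=too-many-arguments,too-many-locals
--
--     all_galaxy_distances = []
--
--     for start_pos in galaxies:
--
--         dist = {start_pos: 0}
--         q = [(0, start_pos)]
--
--         while len(q) > 0:
--             u = heappop(q)[1]
--             for v in neighbours(u, width, height):
--                 nx, ny = v
--                 step_dist = scale_factor if ((ny in empty_rows) or (nx in empty_columns)) else 1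
--                 alt = dist[u] + step_dist
--                 if (v not in dist) or (alt < dist[v]):
--                     dist[v] = alt
--                     heappush(q, (alt, v))
--
--         galaxy_distances = [dist[g] for g in galaxies]
--         all_galaxy_distances.extend(galaxy_distances)
--
--     return all_galaxy_distances
--
-- def neighbours(pos, width, height):
--     x, y = pos
--     for ox, oy in (-1, 0), (1, 0), (0, -1), (0, 1):
--         nx, ny = (x + ox), (y + oy)
--         if (0 <= nx < width) and (0 <= ny < height):
--             yield nx, ny
-- ===== SOURCE B (Python) =====
-- def find_galaxy_distances(galaxies, empty_rows, empty_columns, scale_factor, width, height):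
--     # Closed form instead of per-galaxy Dijkstra: distance between two galaxies is the
--     # Manhattan distance plus (scale_factor - 1) for each distinct empty row/column strictly between.
--     rows = set(empty_rows)
--     cols = set(empty_columns)
--     extra = scale_factor - 1
--     out = []
--     for (x1, y1) in galaxies:
--         for (x2, y2) in galaxies:
--             lo_x, hi_x = min(x1, x2), max(x1, x2)
--             lo_y, hi_y = min(y1, y2), max(y1, y2)
--             ec = sum(1 for c in cols if lo_x < c < hi_x)
--             er = sum(1 for r in rows if lo_y < r < hi_y)
--             out.append((hi_x - lo_x) + (hi_y - lo_y) + extra * (ec + er))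
--     return out
-- ===== Notes on version B (the rewrite author's own statement) =====
-- stated objective: faster
-- what changed: Replaces the per-galaxy Dijkstra flood of the whole W*H grid with a closed-form per-pair formula: Manhattan distance plus (scale_factor-1) for each distinct empty row/column strictly between the pair.
-- outside the precondition, e.g. on find_galaxy_distances([(0, 0), (3, 0)], {1}, set(), 0, 4, 2): A returns [0, 1, 1, 0], B returns [0, 3, 3, 0]; on find_galaxy_distances([(0, 0), (2, 0)], {0}, set(), 2, 3, 1): A returns [0, 4, 4, 0], B returns [0, 2, 2, 0]
import Mathlib
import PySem

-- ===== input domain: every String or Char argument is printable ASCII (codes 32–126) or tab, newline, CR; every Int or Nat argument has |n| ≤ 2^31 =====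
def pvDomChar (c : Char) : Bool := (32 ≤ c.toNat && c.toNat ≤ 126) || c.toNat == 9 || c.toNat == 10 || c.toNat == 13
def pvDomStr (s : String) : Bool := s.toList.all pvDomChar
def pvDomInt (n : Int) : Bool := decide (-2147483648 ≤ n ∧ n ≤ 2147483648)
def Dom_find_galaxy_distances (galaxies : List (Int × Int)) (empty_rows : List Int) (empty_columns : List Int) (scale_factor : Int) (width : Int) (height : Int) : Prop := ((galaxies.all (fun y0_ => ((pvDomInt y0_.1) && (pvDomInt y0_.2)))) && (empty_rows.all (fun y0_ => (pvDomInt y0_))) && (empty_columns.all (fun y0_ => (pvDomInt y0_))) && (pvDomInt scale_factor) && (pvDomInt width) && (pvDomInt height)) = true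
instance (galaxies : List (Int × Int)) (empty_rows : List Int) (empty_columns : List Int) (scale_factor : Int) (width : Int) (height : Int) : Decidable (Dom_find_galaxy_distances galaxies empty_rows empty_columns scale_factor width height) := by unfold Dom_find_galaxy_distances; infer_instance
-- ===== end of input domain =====

-- B replaces A's per-galaxy Dijkstra flood of the whole grid by a closed-form per-pair formula
-- (Manhattan distance + (scale_factor-1) per distinct empty row/column strictly between); objective: faster.

-- ===== PORT A =====

-- Python's `neighbours(pos, width, height)` generator, as the list it yields.
def pvNbrs (u : Int × Int) (width height : Int) : List (Int × Int) :=
  ([(u.1 - 1, u.2), (u.1 + 1, u.2), (u.1, u.2 - 1), (u.1, u.2 + 1)]).filter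
    (fun v => decide (0 ≤ v.1 ∧ v.1 < width ∧ 0 ≤ v.2 ∧ v.2 < height))

-- `scale_factor if ((ny in empty_rows) or (nx in empty_columns)) else 1`
def pvStepDist (empty_rows empty_columns : List Int) (scale_factor : Int) (v : Int × Int) : Int :=
  if v.2 ∈ empty_rows ∨ v.1 ∈ empty_columns then scale_factor else 1

-- Python tuple `<` on heap entries (alt, (x, y))
def pvQLt (a b : Int × (Int × Int)) : Bool :=
  a.1 < b.1 || (a.1 == b.1 && (a.2.1 < b.2.1 || (a.2.1 == b.2.1 && a.2.2 < b.2.2)))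

-- heappop's result: the lexicographically least entry.  heapq over totally ordered tuples
-- pops the minimum and equal tuples are indistinguishable, so the heap IS the multiset of
-- its entries with pop-min; we model it exactly as a list with pop-min (push = append).
def pvQMin (e : Int × (Int × Int)) (rest : List (Int × (Int × Int))) : Int × (Int × Int) :=
  rest.foldl (fun m x => if pvQLt x m then x else m) e

-- body of `for v in neighbours(u, width, height)`: one relaxation of the state (dist, q)
def pvRelax (empty_rows empty_columns : List Int) (scale_factor : Int) (u : Int × Int)
    (st : PySem.Dict (Int × Int) Int × List (Int × (Int × Int))) (v : Int × Int) :
    PySem.Dict (Int × Int) Int × List (Int × (Int × Int)) :=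
  let alt := st.1.getD u 0 + pvStepDist empty_rows empty_columns scale_factor v  -- dist[u]: u is always a key
  let upd := match st.1.get? v with
    | none => true            -- `v not in dist`
    | some dv => alt < dv     -- `alt < dist[v]`
  if upd then (st.1.insert v alt, st.2 ++ [(alt, v)]) else st

-- `while len(q) > 0`; fuel is a totality artifact only (under Pre_ it provably never runs out)
def pvLoop (empty_rows empty_columns : List Int) (scale_factor width height : Int) :
    Nat → PySem.Dict (Int × Int) Int → List (Int × (Int × Int)) →
    Option (PySem.Dict (Int × Int) Int)
  | _, dist, [] => some dist
  | 0, _, _ :: _ => none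
  | fuel + 1, dist, e :: rest =>
    let m := pvQMin e rest
    let st := (pvNbrs m.2 width height).foldl
      (pvRelax empty_rows empty_columns scale_factor m.2) (dist, (e :: rest).erase m)
    pvLoop empty_rows empty_columns scale_factor width height fuel st.1 st.2

def pvFuel (scale_factor width height : Int) : Nat :=
  ((width.toNat * height.toNat + 1) * (scale_factor.toNat + 1) + 2) *
    (width.toNat * height.toNat + 1) + 2

-- the body of `for start_pos in galaxies` up to the final dict `dist`
def pvDijkstra (empty_rows empty_columns : List Int) (scale_factor width height : Int)
    (start_pos : Int × Int) : Option (PySem.Dict (Int × Int) Int) :=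
  pvLoop empty_rows empty_columns scale_factor width height
    (pvFuel scale_factor width height)
    (PySem.Dict.empty.insert start_pos 0) [(0, start_pos)]

def find_galaxy_distances (galaxies : List (Int × Int)) (empty_rows : List Int) (empty_columns : List Int) (scale_factor : Int) (width : Int) (height : Int) : List Int :=
  galaxies.foldl (fun all_galaxy_distances start_pos =>
    match pvDijkstra empty_rows empty_columns scale_factor width height start_pos with
    | none => all_galaxy_distances   -- fuel ran out: never happens under Pre_
    | some dist =>
        -- `dist[g]`: a missing key is Python's KeyError, excluded by Pre_ (getD default unreachable there)
        all_galaxy_distances ++ galaxies.map (fun g => dist.getD g 0)) []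

-- ===== PORT B =====

-- one pair's distance: Manhattan + extra per distinct empty row/column strictly between
def pvPairDist (rows cols : List Int) (extra : Int) (p1 p2 : Int × Int) : Int :=
  let lo_x := min p1.1 p2.1
  let hi_x := max p1.1 p2.1
  let lo_y := min p1.2 p2.2
  let hi_y := max p1.2 p2.2
  let ec : Int := (cols.countP (fun c => decide (lo_x < c ∧ c < hi_x)) : Int)
  let er : Int := (rows.countP (fun r => decide (lo_y < r ∧ r < hi_y)) : Int)
  (hi_x - lo_x) + (hi_y - lo_y) + extra * (ec + er)

def find_galaxy_distances_alt (galaxies : List (Int × Int)) (empty_rows : List Int) (empty_columns : List Int) (scale_factor : Int) (width : Int) (height : Int) : List Int :=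
  let rows := PySem.Set.ofList empty_rows
  let cols := PySem.Set.ofList empty_columns
  let extra := scale_factor - 1
  galaxies.foldl (fun out p1 =>
    out ++ galaxies.map (fun p2 => pvPairDist rows cols extra p1 p2)) []

-- ===== PRECONDITION & SPEC =====

-- a grid cell
def pvValid (w h : Int) (v : Int × Int) : Prop := 0 ≤ v.1 ∧ v.1 < w ∧ 0 ≤ v.2 ∧ v.2 < h

-- none of the four neighbour positions of v is a grid cell
def pvNoNbr (w h : Int) (v : Int × Int) : Prop :=
  ¬ pvValid w h (v.1 - 1, v.2) ∧ ¬ pvValid w h (v.1 + 1, v.2) ∧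
  ¬ pvValid w h (v.1, v.2 - 1) ∧ ¬ pvValid w h (v.1, v.2 + 1)


-- Pre_ restricts to the puzzle's natural domain: either no path is needed (no galaxies, or all
-- galaxies at one position with a non-negative scale factor or an off-grid isolated position),
-- or an expansion factor ≥ 1 with galaxies inside the grid and (unless scale_factor = 1, where
-- expansion is a no-op) no galaxy on an "empty" row/column (an empty row/column by definition
-- contains no galaxy).  Outside it A raises KeyError (galaxy unreachable), may diverge
-- (scale_factor ≤ -1), or returns a detour-through-cheap-lines value that is not the
-- expanded-grid distance (scale_factor < 1, or a galaxy on an empty line).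
def Pre_find_galaxy_distances (galaxies : List (Int × Int)) (empty_rows : List Int) (empty_columns : List Int) (scale_factor : Int) (width : Int) (height : Int) : Prop :=
  galaxies = [] ∨
  ((∀ g ∈ galaxies, ∀ g' ∈ galaxies, g = g') ∧
    (0 ≤ scale_factor ∨ ∀ g ∈ galaxies, pvNoNbr width height g)) ∨
  (1 ≤ scale_factor ∧
    (∀ g ∈ galaxies, pvValid width height g) ∧
    (scale_factor = 1 ∨ ∀ g ∈ galaxies, g.1 ∉ empty_columns ∧ g.2 ∉ empty_rows))
instance (galaxies : List (Int × Int)) (empty_rows : List Int) (empty_columns : List Int) (scale_factor : Int) (width : Int) (height : Int) : Decidable (Pre_find_galaxy_distances galaxies empty_rows empty_columns scale_factor width height) := by unfold Pre_find_galaxy_distances pvNoNbr pvValid; infer_instance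

def pvWitness_find_galaxy_distances : (List (Int × Int)) × List Int × List Int × Int × Int × Int :=
  ([(0, 0), (3, 2)], [1], [1, 2], 2, 4, 3)

def Spec_find_galaxy_distances (galaxies : List (Int × Int)) (empty_rows : List Int) (empty_columns : List Int) (scale_factor : Int) (width : Int) (height : Int) (out : List Int) : Prop := out = find_galaxy_distances_alt galaxies empty_rows empty_columns scale_factor width height
instance (galaxies : List (Int × Int)) (empty_rows : List Int) (empty_columns : List Int) (scale_factor : Int) (width : Int) (height : Int) (out : List Int) : Decidable (Spec_find_galaxy_distances galaxies empty_rows empty_columns scale_factor width height out) := by unfold Spec_find_galaxy_distances; infer_instance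

-- ===== CLAIM (what is proved, stated in full; the proofs are below) =====
def Claim_equal_find_galaxy_distances : Prop := ∀ (galaxies : List (Int × Int)) (empty_rows : List Int) (empty_columns : List Int) (scale_factor : Int) (width : Int) (height : Int), Dom_find_galaxy_distances galaxies empty_rows empty_columns scale_factor width height → Pre_find_galaxy_distances galaxies empty_rows empty_columns scale_factor width height → Spec_find_galaxy_distances galaxies empty_rows empty_columns scale_factor width height (find_galaxy_distances galaxies empty_rows empty_columns scale_factor width height)

-- ===== LEMMAS AND PROOFS =====

-- cells, weights, reachability ---------------------------------------------------------------

-- cost of ENTERING cell v (A's step_dist)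
inductive pvReach (ER EC : List Int) (s w h : Int) (g : Int × Int) : Int → (Int × Int) → Prop
  | base : pvReach ER EC s w h g 0 g
  | step {c : Int} {u v : Int × Int} :
      pvReach ER EC s w h g c u → v ∈ pvNbrs u w h →
      pvReach ER EC s w h g (c + pvStepDist ER EC s v) v

lemma mem_pvNbrs {u v : Int × Int} {w h : Int} :
    v ∈ pvNbrs u w h ↔
      ((v = (u.1 - 1, u.2) ∨ v = (u.1 + 1, u.2) ∨ v = (u.1, u.2 - 1) ∨ v = (u.1, u.2 + 1)) ∧
        pvValid w h v) := by
  simp [pvNbrs, List.mem_filter, pvValid, and_comm]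

lemma pvNbrs_ne {u v : Int × Int} {w h : Int} (hv : v ∈ pvNbrs u w h) : v ≠ u := by
  rcases (mem_pvNbrs.1 hv).1 with h' | h' | h' | h' <;>
    (subst h'; intro hEq; rcases u with ⟨a, b⟩;
     have h1 := congrArg Prod.fst hEq; have h2 := congrArg Prod.snd hEq;
     dsimp at h1 h2; omega)

lemma pvNbrs_valid {u v : Int × Int} {w h : Int} (hv : v ∈ pvNbrs u w h) : pvValid w h v :=
  (mem_pvNbrs.1 hv).2

lemma pvStepDist_bounds {ER EC : List Int} {s : Int} (hs : 0 ≤ s) (v : Int × Int) :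
    0 ≤ pvStepDist ER EC s v ∧ pvStepDist ER EC s v ≤ max s 1 := by
  unfold pvStepDist
  constructor
  · split <;> omega
  · split
    · exact le_max_left _ _
    · exact le_max_right _ _

-- the potential: lower bound for the cost of reaching v from g1 ------------------------------

-- signed-interval count: distinct members of l strictly between x1 and x, plus x itself
def pvCt (l : List Int) (x1 x : Int) : Int :=
  ((PySem.Set.ofList l).countP (fun c => decide ((x1 < c ∧ c ≤ x) ∨ (x ≤ c ∧ c < x1))) : Int)

def pvPhi (ER EC : List Int) (s : Int) (g1 v : Int × Int) : Int :=
  |v.1 - g1.1| + |v.2 - g1.2| + (s - 1) * (pvCt EC g1.1 v.1 + pvCt ER g1.2 v.2)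

lemma pvCt_self (l : List Int) (x1 : Int) : pvCt l x1 x1 = 0 := by
  unfold pvCt
  have : (PySem.Set.ofList l).countP
      (fun c => decide ((x1 < c ∧ c ≤ x1) ∨ (x1 ≤ c ∧ c < x1))) = 0 := by
    rw [List.countP_eq_zero]
    intro a _
    simp only [decide_eq_true_eq]
    omega
  rw [this]
  rfl

lemma pvCt_nonneg (l : List Int) (x1 x : Int) : 0 ≤ pvCt l x1 x := Int.natCast_nonneg _

-- countP of (p ∨ · = a) over a nodup list
lemma countP_or_eq (l : List Int) (p : Int → Bool) (a : Int) (hnd : l.Nodup) (hpa : p a = false) :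
    l.countP (fun c => p c || c == a) = l.countP p + (if a ∈ l then 1 else 0) := by
  induction l with
  | nil => simp
  | cons b t ih =>
    rcases List.nodup_cons.1 hnd with ⟨hbt, hndt⟩
    by_cases hba : b = a
    · subst hba
      simp [List.countP_cons, hpa, hbt, ih hndt]
    · simp only [List.countP_cons, List.mem_cons]
      rw [ih hndt]
      by_cases hb : p b = true <;> by_cases hal : a ∈ t <;>
        simp [hb, hal, hba, Ne.symm hba, beq_iff_eq]

-- one axis move changes |x - x1| + e * pvCt by at most 1 + e·[x' ∈ l]
-- moving away from x1 the change is exact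
lemma pvCt_move_away (l : List Int) (x1 x x' : Int)
    (hstep : (x1 ≤ x ∧ x' = x + 1) ∨ (x ≤ x1 ∧ x' = x - 1)) :
    pvCt l x1 x' = pvCt l x1 x + (if x' ∈ l then 1 else 0) ∧
    |x' - x1| = |x - x1| + 1 := by
  have hnd := PySem.Set.nodup_ofList l
  have hdir : x1 ≤ x ∨ x ≤ x1 := by rcases hstep with ⟨h, _⟩ | ⟨h, _⟩ <;> omega
  have hx' : x' = x + 1 ∧ x1 ≤ x ∨ x' = x - 1 ∧ x ≤ x1 := by
    rcases hstep with ⟨h, h'⟩ | ⟨h, h'⟩ <;> omega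
  have key : (PySem.Set.ofList l).countP
        (fun c => decide ((x1 < c ∧ c ≤ x') ∨ (x' ≤ c ∧ c < x1))) =
      (PySem.Set.ofList l).countP
        (fun c => decide ((x1 < c ∧ c ≤ x) ∨ (x ≤ c ∧ c < x1))) +
      (if x' ∈ PySem.Set.ofList l then 1 else 0) := by
    have hcong : (PySem.Set.ofList l).countP
          (fun c => decide ((x1 < c ∧ c ≤ x') ∨ (x' ≤ c ∧ c < x1))) =
        (PySem.Set.ofList l).countP
          (fun c => (decide ((x1 < c ∧ c ≤ x) ∨ (x ≤ c ∧ c < x1))) || c == x') := by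
      apply List.countP_congr
      intro c _
      rw [Bool.eq_iff_iff]
      simp only [Bool.or_eq_true, decide_eq_true_eq, beq_iff_eq, iff_true]
      rcases hx' with ⟨rfl, hle⟩ | ⟨rfl, hle⟩ <;> omega
    rw [hcong]
    refine countP_or_eq _ _ _ hnd ?_
    simp only [decide_eq_false_iff_not]
    rcases hx' with ⟨rfl, hle⟩ | ⟨rfl, hle⟩ <;> omega
  constructor
  · unfold pvCt
    by_cases hm : x' ∈ l
    · have hm' : x' ∈ PySem.Set.ofList l := (PySem.Set.mem_ofList _ _).2 hm
      rw [key, if_pos hm', if_pos hm]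
      push_cast
      ring
    · have hm' : x' ∉ PySem.Set.ofList l := fun hc => hm ((PySem.Set.mem_ofList _ _).1 hc)
      rw [key, if_neg hm', if_neg hm]
      push_cast
      ring
  · rcases hx' with ⟨rfl, hle⟩ | ⟨rfl, hle⟩
    · rw [abs_of_nonneg (by omega), abs_of_nonneg (by omega)]; omega
    · rw [abs_of_nonpos (by omega), abs_of_nonpos (by omega)]; omega

lemma pvCt_move (l : List Int) (e x1 x x' : Int) (he : 0 ≤ e)
    (hstep : x' = x + 1 ∨ x' = x - 1) :
    |x' - x1| + e * pvCt l x1 x' ≤ |x - x1| + e * pvCt l x1 x + 1 +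
      e * (if x' ∈ l then 1 else 0) := by
  have hit : (0 : Int) ≤ (if x' ∈ l then 1 else 0) := by split <;> omega
  have hite := mul_nonneg he hit
  rcases hstep with rfl | rfl
  · by_cases hdir : x1 ≤ x
    · obtain ⟨h1, h2⟩ := pvCt_move_away l x1 x (x + 1) (Or.inl ⟨hdir, rfl⟩)
      rw [h1, h2]
      ring_nf
      nlinarith [pvCt_nonneg l x1 x]
    · have hmono : pvCt l x1 (x + 1) ≤ pvCt l x1 x := by
        unfold pvCt
        have := List.countP_mono_left (l := PySem.Set.ofList l)
          (p := fun c => decide ((x1 < c ∧ c ≤ x + 1) ∨ (x + 1 ≤ c ∧ c < x1)))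
          (q := fun c => decide ((x1 < c ∧ c ≤ x) ∨ (x ≤ c ∧ c < x1)))
          (by intro a _; simp only [decide_eq_true_eq]; omega)
        exact_mod_cast this
      have h1 : |x + 1 - x1| = |x - x1| - 1 := by
        rw [abs_of_nonpos (by omega), abs_of_nonpos (by omega)]; omega
      have := mul_le_mul_of_nonneg_left hmono he
      linarith
  · by_cases hdir : x ≤ x1
    · obtain ⟨h1, h2⟩ := pvCt_move_away l x1 x (x - 1) (Or.inr ⟨hdir, rfl⟩)
      rw [h1, h2]
      ring_nf
      nlinarith [pvCt_nonneg l x1 x]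
    · have hmono : pvCt l x1 (x - 1) ≤ pvCt l x1 x := by
        unfold pvCt
        have := List.countP_mono_left (l := PySem.Set.ofList l)
          (p := fun c => decide ((x1 < c ∧ c ≤ x - 1) ∨ (x - 1 ≤ c ∧ c < x1)))
          (q := fun c => decide ((x1 < c ∧ c ≤ x) ∨ (x ≤ c ∧ c < x1)))
          (by intro a _; simp only [decide_eq_true_eq]; omega)
        exact_mod_cast this
      have h1 : |x - 1 - x1| = |x - x1| - 1 := by
        rw [abs_of_nonneg (by omega), abs_of_nonneg (by omega)]; omega
      have := mul_le_mul_of_nonneg_left hmono he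
      linarith

lemma pvPhi_self (ER EC : List Int) (s : Int) (g1 : Int × Int) : pvPhi ER EC s g1 g1 = 0 := by
  simp [pvPhi, pvCt_self]

-- entering a cell costs at least 1 + (s-1)·[its column is empty] (resp. row)
lemma pvStep_ge_col {ER EC : List Int} {s : Int} (hs : 1 ≤ s) (v : Int × Int) :
    1 + (s - 1) * (if v.1 ∈ EC then 1 else 0) ≤ pvStepDist ER EC s v := by
  unfold pvStepDist
  split_ifs <;> simp_all

lemma pvStep_ge_row {ER EC : List Int} {s : Int} (hs : 1 ≤ s) (v : Int × Int) :
    1 + (s - 1) * (if v.2 ∈ ER then 1 else 0) ≤ pvStepDist ER EC s v := by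
  unfold pvStepDist
  split_ifs <;> simp_all

-- the potential is a lower bound on any reach cost
lemma pvPhi_le_reach {ER EC : List Int} {s w h : Int} {g1 : Int × Int} (hs : 1 ≤ s) :
    ∀ {c v}, pvReach ER EC s w h g1 c v → pvPhi ER EC s g1 v ≤ c := by
  have he : (0 : Int) ≤ s - 1 := by omega
  intro c v hr
  induction hr with
  | base => simp [pvPhi_self]
  | @step c u v hru hv ih =>
    rcases (mem_pvNbrs.1 hv).1 with h' | h' | h' | h' <;> subst h'
    · have hmv := pvCt_move EC (s - 1) g1.1 u.1 (u.1 - 1) he (Or.inr rfl)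
      have hw := pvStep_ge_col (ER := ER) (EC := EC) hs (u.1 - 1, u.2)
      unfold pvPhi at ih ⊢
      dsimp only at *
      simp only [mul_add] at ih ⊢
      linarith
    · have hmv := pvCt_move EC (s - 1) g1.1 u.1 (u.1 + 1) he (Or.inl rfl)
      have hw := pvStep_ge_col (ER := ER) (EC := EC) hs (u.1 + 1, u.2)
      unfold pvPhi at ih ⊢
      dsimp only at *
      simp only [mul_add] at ih ⊢
      linarith
    · have hmv := pvCt_move ER (s - 1) g1.2 u.2 (u.2 - 1) he (Or.inr rfl)
      have hw := pvStep_ge_row (ER := ER) (EC := EC) hs (u.1, u.2 - 1)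
      unfold pvPhi at ih ⊢
      dsimp only at *
      simp only [mul_add] at ih ⊢
      linarith
    · have hmv := pvCt_move ER (s - 1) g1.2 u.2 (u.2 + 1) he (Or.inl rfl)
      have hw := pvStep_ge_row (ER := ER) (EC := EC) hs (u.1, u.2 + 1)
      unfold pvPhi at ih ⊢
      dsimp only at *
      simp only [mul_add] at ih ⊢
      linarith

-- the staircase path realises the potential --------------------------------------------------

-- the exact cost of a step into a cell whose row is known non-empty (resp. column);
-- with scale_factor = 1 every step costs 1 and the formula holds vacuously
lemma pvStep_col {ER EC : List Int} {s : Int} {v : Int × Int} (hrow : s = 1 ∨ v.2 ∉ ER) :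
    pvStepDist ER EC s v = 1 + (s - 1) * (if v.1 ∈ EC then 1 else 0) := by
  rcases hrow with rfl | hrow
  · unfold pvStepDist
    split_ifs <;> ring
  · by_cases hc : v.1 ∈ EC
    · simp [pvStepDist, hc]
    · simp [pvStepDist, hc, hrow]

lemma pvStep_row {ER EC : List Int} {s : Int} {v : Int × Int} (hcol : s = 1 ∨ v.1 ∉ EC) :
    pvStepDist ER EC s v = 1 + (s - 1) * (if v.2 ∈ ER then 1 else 0) := by
  rcases hcol with rfl | hcol
  · unfold pvStepDist
    split_ifs <;> ring
  · by_cases hr : v.2 ∈ ER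
    · simp [pvStepDist, hr]
    · simp [pvStepDist, hr, hcol]

lemma pvReach_horiz {ER EC : List Int} {s w h : Int} {g1 : Int × Int}
    (h1 : pvValid w h g1) (hy1 : s = 1 ∨ g1.2 ∉ ER) :
    ∀ (k : Nat) (x : Int), (x = g1.1 + k ∨ x = g1.1 - k) → 0 ≤ x → x < w →
      pvReach ER EC s w h g1 (pvPhi ER EC s g1 (x, g1.2)) (x, g1.2) := by
  intro k
  induction k with
  | zero =>
    intro x hx _ _
    have hxe : x = g1.1 := by omega
    subst hxe
    have hpair : (g1.1, g1.2) = g1 := rfl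
    rw [hpair, pvPhi_self]
    exact pvReach.base
  | succ k ih =>
    intro x hx hx0 hxw
    obtain ⟨hg1, hg2, hg3, hg4⟩ := h1
    rcases hx with hx | hx
    · have hr := ih (x - 1) (Or.inl (by push_cast at hx ⊢; omega)) (by omega) (by omega)
      have hmem : (x, g1.2) ∈ pvNbrs (x - 1, g1.2) w h := by
        rw [mem_pvNbrs]
        exact ⟨Or.inr (Or.inl (by simp [Prod.ext_iff])), ⟨hx0, hxw, hg3, hg4⟩⟩
      have hstep := pvReach.step hr hmem
      have hcost : pvPhi ER EC s g1 (x, g1.2) =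
          pvPhi ER EC s g1 (x - 1, g1.2) + pvStepDist ER EC s (x, g1.2) := by
        obtain ⟨hct, habs⟩ :=
          pvCt_move_away EC g1.1 (x - 1) x (Or.inl ⟨by omega, by omega⟩)
        rw [pvStep_col (ER := ER) (v := (x, g1.2)) hy1]
        unfold pvPhi
        dsimp only
        rw [habs, hct]
        ring
      rw [hcost]
      exact hstep
    · have hr := ih (x + 1) (Or.inr (by push_cast at hx ⊢; omega)) (by omega) (by omega)
      have hmem : (x, g1.2) ∈ pvNbrs (x + 1, g1.2) w h := by
        rw [mem_pvNbrs]
        exact ⟨Or.inl (by simp [Prod.ext_iff]), ⟨hx0, hxw, hg3, hg4⟩⟩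
      have hstep := pvReach.step hr hmem
      have hcost : pvPhi ER EC s g1 (x, g1.2) =
          pvPhi ER EC s g1 (x + 1, g1.2) + pvStepDist ER EC s (x, g1.2) := by
        obtain ⟨hct, habs⟩ :=
          pvCt_move_away EC g1.1 (x + 1) x (Or.inr ⟨by omega, by omega⟩)
        rw [pvStep_col (ER := ER) (v := (x, g1.2)) hy1]
        unfold pvPhi
        dsimp only
        rw [habs, hct]
        ring
      rw [hcost]
      exact hstep

lemma pvReach_vert {ER EC : List Int} {s w h : Int} {g1 : Int × Int} {x2 : Int}
    (h1 : pvValid w h g1) (hx2 : s = 1 ∨ x2 ∉ EC) (hx2a : 0 ≤ x2) (hx2b : x2 < w)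
    (hbase : pvReach ER EC s w h g1 (pvPhi ER EC s g1 (x2, g1.2)) (x2, g1.2)) :
    ∀ (k : Nat) (y : Int), (y = g1.2 + k ∨ y = g1.2 - k) → 0 ≤ y → y < h →
      pvReach ER EC s w h g1 (pvPhi ER EC s g1 (x2, y)) (x2, y) := by
  intro k
  induction k with
  | zero =>
    intro y hy _ _
    have hye : y = g1.2 := by omega
    subst hye
    exact hbase
  | succ k ih =>
    intro y hy hy0 hyh
    obtain ⟨hg1, hg2, hg3, hg4⟩ := h1
    rcases hy with hy | hy
    · have hr := ih (y - 1) (Or.inl (by push_cast at hy ⊢; omega)) (by omega) (by omega)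
      have hmem : (x2, y) ∈ pvNbrs (x2, y - 1) w h := by
        rw [mem_pvNbrs]
        exact ⟨Or.inr (Or.inr (Or.inr (by simp [Prod.ext_iff]))), ⟨hx2a, hx2b, hy0, hyh⟩⟩
      have hstep := pvReach.step hr hmem
      have hcost : pvPhi ER EC s g1 (x2, y) =
          pvPhi ER EC s g1 (x2, y - 1) + pvStepDist ER EC s (x2, y) := by
        obtain ⟨hct, habs⟩ :=
          pvCt_move_away ER g1.2 (y - 1) y (Or.inl ⟨by omega, by omega⟩)
        rw [pvStep_row (ER := ER) (v := (x2, y)) hx2]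
        unfold pvPhi
        dsimp only
        rw [habs, hct]
        ring
      rw [hcost]
      exact hstep
    · have hr := ih (y + 1) (Or.inr (by push_cast at hy ⊢; omega)) (by omega) (by omega)
      have hmem : (x2, y) ∈ pvNbrs (x2, y + 1) w h := by
        rw [mem_pvNbrs]
        exact ⟨Or.inr (Or.inr (Or.inl (by simp [Prod.ext_iff]))), ⟨hx2a, hx2b, hy0, hyh⟩⟩
      have hstep := pvReach.step hr hmem
      have hcost : pvPhi ER EC s g1 (x2, y) =
          pvPhi ER EC s g1 (x2, y + 1) + pvStepDist ER EC s (x2, y) := by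
        obtain ⟨hct, habs⟩ :=
          pvCt_move_away ER g1.2 (y + 1) y (Or.inr ⟨by omega, by omega⟩)
        rw [pvStep_row (ER := ER) (v := (x2, y)) hx2]
        unfold pvPhi
        dsimp only
        rw [habs, hct]
        ring
      rw [hcost]
      exact hstep

lemma pvReach_phi {ER EC : List Int} {s w h : Int} {g1 g2 : Int × Int} (hs : 1 ≤ s)
    (h1 : pvValid w h g1) (h2 : pvValid w h g2)
    (hy1 : s = 1 ∨ g1.2 ∉ ER) (hx2 : s = 1 ∨ g2.1 ∉ EC) :
    pvReach ER EC s w h g1 (pvPhi ER EC s g1 g2) g2 := by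
  obtain ⟨ha, hb, hc, hd⟩ := h2
  have hbase := pvReach_horiz (ER := ER) (EC := EC) (s := s) h1 hy1
    ((g2.1 - g1.1).natAbs) g2.1 (by omega) ha hb
  have hful := pvReach_vert h1 hx2 ha hb hbase ((g2.2 - g1.2).natAbs) g2.2 (by omega) hc hd
  have hpair : (g2.1, g2.2) = g2 := rfl
  rwa [hpair] at hful

-- pvPhi at a galaxy pair IS B's pair formula
-- strictly-between count = half-open count when the endpoint is not a member
lemma pvCt_strict (l : List Int) {x1 x2 : Int} (hx2 : x2 ∉ l) :
    ((PySem.Set.ofList l).countP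
        (fun c => decide (min x1 x2 < c ∧ c < max x1 x2)) : Int) = pvCt l x1 x2 := by
  unfold pvCt
  congr 1
  apply List.countP_congr
  intro c hc
  have hne : c ≠ x2 := fun hEq => hx2 (hEq ▸ (PySem.Set.mem_ofList _ _).1 hc)
  rw [Bool.eq_iff_iff]
  simp only [decide_eq_true_eq, iff_true, true_iff, iff_false, false_iff]
  rcases le_total x1 x2 with hle | hle
  · rw [min_eq_left hle, max_eq_right hle]; omega
  · rw [min_eq_right hle, max_eq_left hle]; omega

lemma pvPairDist_eq_phi {ER EC : List Int} {s : Int} {g1 g2 : Int × Int}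
    (hok : s = 1 ∨ (g2.1 ∉ EC ∧ g2.2 ∉ ER)) :
    pvPairDist (PySem.Set.ofList ER) (PySem.Set.ofList EC) (s - 1) g1 g2 =
      pvPhi ER EC s g1 g2 := by
  have habsx : max g1.1 g2.1 - min g1.1 g2.1 = |g2.1 - g1.1| := by
    rcases le_total g1.1 g2.1 with hle | hle
    · rw [abs_of_nonneg (by omega)]; omega
    · rw [abs_of_nonpos (by omega)]; omega
  have habsy : max g1.2 g2.2 - min g1.2 g2.2 = |g2.2 - g1.2| := by
    rcases le_total g1.2 g2.2 with hle | hle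
    · rw [abs_of_nonneg (by omega)]; omega
    · rw [abs_of_nonpos (by omega)]; omega
  rcases hok with rfl | ⟨hx2, hy2⟩
  · unfold pvPairDist pvPhi
    dsimp only
    rw [habsx, habsy]
    ring
  · have hec := pvCt_strict EC (x1 := g1.1) hx2
    have her := pvCt_strict ER (x1 := g1.2) hy2
    unfold pvPairDist pvPhi
    dsimp only
    rw [hec, her, habsx, habsy]

-- the formula at a pair of identical galaxies is 0
lemma pvPairDist_self (rows cols : List Int) (extra : Int) (g : Int × Int) :
    pvPairDist rows cols extra g g = 0 := by
  have hz : ∀ (l : List Int) (x : Int),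
      l.countP (fun c => decide (min x x < c ∧ c < max x x)) = 0 := by
    intro l x
    rw [List.countP_eq_zero]
    intro a _
    simp only [decide_eq_true_eq, min_self, max_self]
    omega
  unfold pvPairDist
  dsimp only
  rw [hz, hz]
  simp

-- loop invariant ------------------------------------------------------------------------------

structure PvInv (ER EC : List Int) (s w h : Int) (g : Int × Int)
    (dist : PySem.Dict (Int × Int) Int) (q : List (Int × (Int × Int))) : Prop where
  nodup : dist.keys.Nodup
  gz : dist.get? g = some 0
  reach : ∀ v c, dist.get? v = some c →
    pvReach ER EC s w h g c v ∧ 0 ≤ c ∧ c ≤ (dist.size : Int) * max s 1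
  valid : ∀ v ∈ dist.keys, v = g ∨ pvValid w h v
  qcl : ∀ e ∈ q, ∃ c, dist.get? e.2 = some c ∧ c ≤ e.1
  fix : ∀ v c, dist.get? v = some c →
    (∃ a, (a, v) ∈ q) ∨
    (∀ v' ∈ pvNbrs v w h, ∃ c', dist.get? v' = some c' ∧ c' ≤ c + pvStepDist ER EC s v')

-- same, mid-iteration: the fixpoint clause is suspended for the popped vertex u
structure PvMid (ER EC : List Int) (s w h : Int) (g u : Int × Int) (du : Int)
    (dist : PySem.Dict (Int × Int) Int) (q : List (Int × (Int × Int))) : Prop where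
  nodup : dist.keys.Nodup
  gz : dist.get? g = some 0
  hu : dist.get? u = some du
  reach : ∀ v c, dist.get? v = some c →
    pvReach ER EC s w h g c v ∧ 0 ≤ c ∧ c ≤ (dist.size : Int) * max s 1
  valid : ∀ v ∈ dist.keys, v = g ∨ pvValid w h v
  qcl : ∀ e ∈ q, ∃ c, dist.get? e.2 = some c ∧ c ≤ e.1
  fix : ∀ v c, dist.get? v = some c → v ≠ u →
    (∃ a, (a, v) ∈ q) ∨
    (∀ v' ∈ pvNbrs v w h, ∃ c', dist.get? v' = some c' ∧ c' ≤ c + pvStepDist ER EC s v')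

def pvMval (dist : PySem.Dict (Int × Int) Int) : Nat := (dist.values.map Int.toNat).sum

def pvMeasure (s w h : Int) (dist : PySem.Dict (Int × Int) Int)
    (q : List (Int × (Int × Int))) : Nat :=
  (w.toNat * h.toNat + 1 - dist.size) * ((w.toNat * h.toNat + 1) * (s.toNat + 1) + 2) +
    pvMval dist + q.length

lemma pvRelax_none {ER EC : List Int} {s : Int} {u v : Int × Int}
    {dist : PySem.Dict (Int × Int) Int} {q : List (Int × (Int × Int))}
    (h : dist.get? v = none) :
    pvRelax ER EC s u (dist, q) v =
      (dist.insert v (dist.getD u 0 + pvStepDist ER EC s v),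
       q ++ [(dist.getD u 0 + pvStepDist ER EC s v, v)]) := by
  simp [pvRelax, h]

lemma pvRelax_lt {ER EC : List Int} {s : Int} {u v : Int × Int}
    {dist : PySem.Dict (Int × Int) Int} {q : List (Int × (Int × Int))} {dv : Int}
    (h : dist.get? v = some dv) (hlt : dist.getD u 0 + pvStepDist ER EC s v < dv) :
    pvRelax ER EC s u (dist, q) v =
      (dist.insert v (dist.getD u 0 + pvStepDist ER EC s v),
       q ++ [(dist.getD u 0 + pvStepDist ER EC s v, v)]) := by
  simp [pvRelax, h, hlt]

lemma pvRelax_ge {ER EC : List Int} {s : Int} {u v : Int × Int}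
    {dist : PySem.Dict (Int × Int) Int} {q : List (Int × (Int × Int))} {dv : Int}
    (h : dist.get? v = some dv) (hge : ¬ dist.getD u 0 + pvStepDist ER EC s v < dv) :
    pvRelax ER EC s u (dist, q) v = (dist, q) := by
  simp [pvRelax, h, hge]

-- additive description of the value-multiset after an overwrite
lemma pvSumUpd {κ : Type} [DecidableEq κ] [BEq κ] [LawfulBEq κ] :
    ∀ (l : List (κ × Int)) (v : κ) (a dv : Int),
      (l.map (·.1)).Nodup → (v, dv) ∈ l →
      ((l.map (fun p => if p.1 == v then (v, a) else p)).map (fun p => p.2.toNat)).sum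
          + dv.toNat
        = (l.map (fun p => p.2.toNat)).sum + a.toNat := by
  intro l
  induction l with
  | nil => intro v a dv _ hmem; simp at hmem
  | cons b t ih =>
    intro v a dv hnd hmem
    rw [List.map_cons, List.nodup_cons] at hnd
    obtain ⟨hbt, hndt⟩ := hnd
    by_cases hbv : b.1 = v
    · have hb : b = (v, dv) := by
        rcases List.mem_cons.1 hmem with h | h
        · exact h.symm
        · have hvm : v ∈ t.map (fun x => x.1) := List.mem_map_of_mem h
          exact absurd hvm (hbv ▸ hbt)
      subst hb
      have hid : t.map (fun p => if p.1 == v then (v, a) else p) = t := by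
        have hcg : ∀ p ∈ t, (if p.1 == v then (v, a) else p) = id p := by
          intro p hp
          have hne : p.1 ≠ v := by
            intro hEq
            have hvm : v ∈ t.map (fun x => x.1) := hEq ▸ List.mem_map_of_mem hp
            exact hbt hvm
          simp [hne]
        rw [List.map_congr_left hcg, List.map_id]
      simp only [List.map_cons, List.sum_cons, hid, beq_self_eq_true, if_pos]
      omega
    · have hmem' : (v, dv) ∈ t := by
        rcases List.mem_cons.1 hmem with h | h
        · exact absurd (congrArg Prod.fst h.symm) hbv
        · exact h
      have hrec := ih v a dv hndt hmem'
      simp only [List.map_cons, List.sum_cons]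
      rw [if_neg (by simp [hbv])]
      omega

lemma pvMval_insert_new {dist : PySem.Dict (Int × Int) Int} {v : Int × Int} {a : Int}
    (h : dist.contains v = false) :
    pvMval (dist.insert v a) = pvMval dist + a.toNat := by
  simp [pvMval, PySem.Dict.values, PySem.Dict.items_insert_of_not_contains _ _ h]

lemma pvMval_insert_upd {dist : PySem.Dict (Int × Int) Int} {v : Int × Int} {a dv : Int}
    (hnd : dist.keys.Nodup) (h : dist.get? v = some dv) :
    pvMval (dist.insert v a) + dv.toNat = pvMval dist + a.toNat := by
  have hc : dist.contains v = true := by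
    rw [PySem.Dict.contains_eq_isSome_get?, h]; rfl
  have hmem := PySem.Dict.mem_items_of_get?_eq_some dist h
  have hnd' : (dist.items.map (·.1)).Nodup := by simpa [PySem.Dict.keys] using hnd
  simpa [pvMval, PySem.Dict.values, PySem.Dict.items_insert_of_contains _ _ hc] using
    pvSumUpd dist.items v a dv hnd' hmem

lemma pvSize_le {w h : Int} {g : Int × Int} {dist : PySem.Dict (Int × Int) Int}
    (hnd : dist.keys.Nodup) (hval : ∀ v ∈ dist.keys, v = g ∨ pvValid w h v) :
    dist.size ≤ w.toNat * h.toNat + 1 := by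
  have hsub : dist.keys.toFinset ⊆
      insert g ((Finset.Ico (0 : ℤ) w) ×ˢ (Finset.Ico (0 : ℤ) h)) := by
    intro v hv
    rcases hval v (List.mem_toFinset.1 hv) with rfl | ⟨h1, h2, h3, h4⟩
    · exact Finset.mem_insert_self _ _
    · apply Finset.mem_insert_of_mem
      simp only [Finset.mem_product, Finset.mem_Ico]
      exact ⟨⟨h1, h2⟩, ⟨h3, h4⟩⟩
  have hcard := Finset.card_le_card hsub
  have hins := Finset.card_insert_le g ((Finset.Ico (0 : ℤ) w) ×ˢ (Finset.Ico (0 : ℤ) h))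
  rw [List.toFinset_card_of_nodup hnd] at hcard
  rw [Finset.card_product] at hins
  simp only [Int.card_Ico, sub_zero] at hins
  have hsz : dist.size = dist.keys.length := by
    simp [PySem.Dict.size, PySem.Dict.keys]
  omega

lemma pvQMin_mem (e : Int × (Int × Int)) (rest : List (Int × (Int × Int))) :
    pvQMin e rest ∈ e :: rest := by
  induction rest generalizing e with
  | nil => simp [pvQMin]
  | cons a t ih =>
    have h := ih (if pvQLt a e then a else e)
    unfold pvQMin at h ⊢
    simp only [List.foldl_cons]
    rcases List.mem_cons.1 h with h' | h'
    · by_cases hc : pvQLt a e = true <;> simp [hc] at h' <;> simp [hc, h']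
    · simp [h']

-- inserting an improved value preserves the mid-invariant and does not raise the measure
lemma pvInsert_mid {ER EC : List Int} {s w h : Int} {g u : Int × Int} {du : Int}
    {dist : PySem.Dict (Int × Int) Int} {q : List (Int × (Int × Int))} {v : Int × Int}
    (hs : 0 ≤ s) (H : PvMid ER EC s w h g u du dist q)
    (hv : v ∈ pvNbrs u w h) (hvu : v ≠ u)
    (hup : dist.get? v = none ∨
      ∃ dv, dist.get? v = some dv ∧ du + pvStepDist ER EC s v < dv) :
    PvMid ER EC s w h g u du (dist.insert v (du + pvStepDist ER EC s v))
        (q ++ [(du + pvStepDist ER EC s v, v)]) ∧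
    pvMeasure s w h (dist.insert v (du + pvStepDist ER EC s v))
        (q ++ [(du + pvStepDist ER EC s v, v)]) ≤ pvMeasure s w h dist q := by
  obtain ⟨hnd, hgz, hu, hreach, hvalid, hqcl, hfix⟩ := H
  obtain ⟨hru, hdu0, hdub⟩ := hreach u du hu
  have hsb := pvStepDist_bounds (ER := ER) (EC := EC) hs v
  have hsm1 : (1 : Int) ≤ max s 1 := le_max_right _ _
  have halt0 : 0 ≤ du + pvStepDist ER EC s v := by omega
  have hvg : v ≠ g := by
    intro hEq
    subst hEq
    rcases hup with hnone | ⟨dv, hsome, hlt⟩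
    · rw [hgz] at hnone; cases hnone
    · rw [hgz] at hsome; injection hsome with h'; omega
  have hreachv := pvReach.step hru hv
  have hvalidv := pvNbrs_valid hv
  have hnd' : (dist.insert v (du + pvStepDist ER EC s v)).keys.Nodup :=
    PySem.Dict.nodup_keys_insert _ _ _ hnd
  have hvalid' : ∀ x ∈ (dist.insert v (du + pvStepDist ER EC s v)).keys,
      x = g ∨ pvValid w h x := by
    intro x hx
    rcases (PySem.Dict.mem_keys_insert _ _ _ _).1 hx with rfl | hx'
    · exact Or.inr hvalidv
    · exact hvalid x hx'
  have hszge : dist.size ≤ (dist.insert v (du + pvStepDist ER EC s v)).size := by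
    rw [PySem.Dict.size_insert]; split <;> omega
  have hmeas : pvMeasure s w h (dist.insert v (du + pvStepDist ER EC s v))
      (q ++ [(du + pvStepDist ER EC s v, v)]) ≤ pvMeasure s w h dist q := by
    rcases hup with hnone | ⟨dv, hsome, hlt⟩
    · have hcont : dist.contains v = false := by
        rw [PySem.Dict.contains_eq_isSome_get?, hnone]; rfl
      have hszeq : (dist.insert v (du + pvStepDist ER EC s v)).size = dist.size + 1 := by
        rw [PySem.Dict.size_insert]; simp [hcont]
      have hMv := pvMval_insert_new (a := du + pvStepDist ER EC s v) hcont
      have hszle : dist.size + 1 ≤ w.toNat * h.toNat + 1 := by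
        have := pvSize_le hnd' hvalid'
        omega
      have haltb : du + pvStepDist ER EC s v ≤ ((dist.size : Int) + 1) * max s 1 := by
        have hbd : ((dist.size : Int) + 1) * max s 1 = (dist.size : Int) * max s 1 + max s 1 := by
          ring
        linarith [hsb.2]
      have haNat : (du + pvStepDist ER EC s v).toNat ≤
          (w.toNat * h.toNat + 1) * (s.toNat + 1) := by
        have hsmle : max s 1 ≤ ((s.toNat + 1 : Nat) : Int) := by
          push_cast [Int.toNat_of_nonneg hs]
          exact max_le (by omega) (by omega)
        have hcast : (((w.toNat * h.toNat + 1) * (s.toNat + 1) : Nat) : Int) =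
            ((w.toNat * h.toNat + 1 : Nat) : Int) * ((s.toNat + 1 : Nat) : Int) := by
          push_cast
          ring
        have hmul : ((dist.size : Int) + 1) * max s 1 ≤
            ((w.toNat * h.toNat + 1 : Nat) : Int) * max s 1 := by
          apply mul_le_mul_of_nonneg_right _ (by omega)
          exact_mod_cast hszle
        have hmul2 : ((w.toNat * h.toNat + 1 : Nat) : Int) * max s 1 ≤
            ((w.toNat * h.toNat + 1 : Nat) : Int) * ((s.toNat + 1 : Nat) : Int) :=
          mul_le_mul_of_nonneg_left hsmle (by positivity)
        have h2 : du + pvStepDist ER EC s v ≤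
            (((w.toNat * h.toNat + 1) * (s.toNat + 1) : Nat) : Int) := by
          rw [hcast]
          linarith
        omega
      unfold pvMeasure
      rw [hszeq, hMv]
      have hexp : (w.toNat * h.toNat + 1 - dist.size) *
            ((w.toNat * h.toNat + 1) * (s.toNat + 1) + 2) =
          (w.toNat * h.toNat + 1 - (dist.size + 1)) *
            ((w.toNat * h.toNat + 1) * (s.toNat + 1) + 2) +
            ((w.toNat * h.toNat + 1) * (s.toNat + 1) + 2) := by
        have h1 : w.toNat * h.toNat + 1 - dist.size =
            (w.toNat * h.toNat + 1 - (dist.size + 1)) + 1 := by omega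
        rw [h1, add_mul, one_mul]
      rw [hexp]
      simp only [List.length_append, List.length_cons, List.length_nil]
      omega
    · have hcont : dist.contains v = true := by
        rw [PySem.Dict.contains_eq_isSome_get?, hsome]; rfl
      have hszeq : (dist.insert v (du + pvStepDist ER EC s v)).size = dist.size := by
        rw [PySem.Dict.size_insert]; simp [hcont]
      have hMv := pvMval_insert_upd (a := du + pvStepDist ER EC s v) hnd hsome
      obtain ⟨_, hdv0, _⟩ := hreach v dv hsome
      unfold pvMeasure
      rw [hszeq]
      simp only [List.length_append, List.length_cons, List.length_nil]
      omega
  refine ⟨⟨hnd', ?_, ?_, ?_, hvalid', ?_, ?_⟩, hmeas⟩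
  · rw [PySem.Dict.get?_insert, if_neg (fun hEq => hvg hEq.symm)]
    exact hgz
  · rw [PySem.Dict.get?_insert, if_neg (fun hEq => hvu hEq.symm)]
    exact hu
  · intro x c hx
    rw [PySem.Dict.get?_insert] at hx
    by_cases hxv : x = v
    · rw [if_pos hxv] at hx
      injection hx with h'
      subst h'
      refine ⟨hxv ▸ hreachv, halt0, ?_⟩
      rcases hup with hnone | ⟨dv, hsome, hlt⟩
      · have hcont : dist.contains v = false := by
          rw [PySem.Dict.contains_eq_isSome_get?, hnone]; rfl
        have hszeq : (dist.insert v (du + pvStepDist ER EC s v)).size = dist.size + 1 := by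
          rw [PySem.Dict.size_insert]; simp [hcont]
        rw [hszeq]
        have hcast : ((dist.size + 1 : Nat) : Int) = (dist.size : Int) + 1 := by
          push_cast; ring
        rw [hcast]
        have hbd : ((dist.size : Int) + 1) * max s 1 = (dist.size : Int) * max s 1 + max s 1 := by
          ring
        linarith [hsb.2]
      · obtain ⟨_, _, hdvb⟩ := hreach v dv hsome
        have hge : ((dist.insert v (du + pvStepDist ER EC s v)).size : Int) * max s 1 ≥
            (dist.size : Int) * max s 1 := by
          apply mul_le_mul_of_nonneg_right _ (by omega : (0 : Int) ≤ max s 1)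
          exact_mod_cast hszge
        linarith
    · rw [if_neg hxv] at hx
      obtain ⟨hr, h0, hb⟩ := hreach x c hx
      refine ⟨hr, h0, le_trans hb ?_⟩
      apply mul_le_mul_of_nonneg_right _ (by omega : (0 : Int) ≤ max s 1)
      exact_mod_cast hszge
  · intro e he
    rcases List.mem_append.1 he with he | he
    · obtain ⟨c0, hc0, hce⟩ := hqcl e he
      by_cases hev : e.2 = v
      · rcases hup with hnone | ⟨dv, hsome, hlt⟩
        · rw [hev, hnone] at hc0; cases hc0
        · rw [hev, hsome] at hc0
          injection hc0 with h'
          refine ⟨du + pvStepDist ER EC s v,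
            by rw [hev]; exact PySem.Dict.get?_insert_self _ _ _, by omega⟩
      · exact ⟨c0, by rw [PySem.Dict.get?_insert, if_neg hev]; exact hc0, hce⟩
    · rcases List.mem_singleton.1 he with rfl
      exact ⟨du + pvStepDist ER EC s v, PySem.Dict.get?_insert_self _ _ _, le_refl _⟩
  · intro x c hx hxu
    by_cases hxv : x = v
    · left
      exact ⟨du + pvStepDist ER EC s v, List.mem_append.2 (Or.inr (by simp [hxv]))⟩
    · rw [PySem.Dict.get?_insert, if_neg hxv] at hx
      rcases hfix x c hx hxu with ⟨b, hb⟩ | hsecond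
      · exact Or.inl ⟨b, List.mem_append.2 (Or.inl hb)⟩
      · right
        intro v' hv'
        obtain ⟨c', hc', hle'⟩ := hsecond v' hv'
        by_cases hv'v : v' = v
        · rw [hv'v] at hc'
          rcases hup with hnone | ⟨dv, hsome, hlt⟩
          · rw [hnone] at hc'; cases hc'
          · rw [hsome] at hc'
            injection hc' with h'
            rw [hv'v] at hle'
            refine ⟨du + pvStepDist ER EC s v', ?_, ?_⟩
            · rw [hv'v]
              exact PySem.Dict.get?_insert_self _ _ _
            · rw [hv'v]
              omega
        · exact ⟨c', by rw [PySem.Dict.get?_insert, if_neg hv'v]; exact hc', hle'⟩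

-- one relaxation preserves the mid-invariant and does not raise the measure
lemma pvRelax_mid {ER EC : List Int} {s w h : Int} {g u : Int × Int} {du : Int}
    {dist : PySem.Dict (Int × Int) Int} {q : List (Int × (Int × Int))} {v : Int × Int}
    (hs : 0 ≤ s) (H : PvMid ER EC s w h g u du dist q)
    (hv : v ∈ pvNbrs u w h) (hvu : v ≠ u) :
    PvMid ER EC s w h g u du (pvRelax ER EC s u (dist, q) v).1 (pvRelax ER EC s u (dist, q) v).2 ∧
    pvMeasure s w h (pvRelax ER EC s u (dist, q) v).1 (pvRelax ER EC s u (dist, q) v).2 ≤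
      pvMeasure s w h dist q ∧
    (∃ c', (pvRelax ER EC s u (dist, q) v).1.get? v = some c' ∧ c' ≤ du + pvStepDist ER EC s v) ∧
    (∀ x c, dist.get? x = some c →
      ∃ c', (pvRelax ER EC s u (dist, q) v).1.get? x = some c' ∧ c' ≤ c) ∧
    (∀ e ∈ q, e ∈ (pvRelax ER EC s u (dist, q) v).2) := by
  have hgetD : dist.getD u 0 = du := PySem.Dict.getD_of_get?_eq_some _ 0 H.hu
  cases hgv : dist.get? v with
  | none =>
    have heq := pvRelax_none (ER := ER) (EC := EC) (s := s) (u := u) (q := q) hgv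
    rw [heq, hgetD]
    dsimp only
    have hmain := pvInsert_mid hs H hv hvu (Or.inl hgv)
    refine ⟨hmain.1, hmain.2,
      ⟨du + pvStepDist ER EC s v, PySem.Dict.get?_insert_self _ _ _, le_refl _⟩, ?_, ?_⟩
    · intro x c hx
      by_cases hxv : x = v
      · rw [hxv, hgv] at hx; cases hx
      · exact ⟨c, by rw [PySem.Dict.get?_insert, if_neg hxv]; exact hx, le_refl _⟩
    · intro e he
      exact List.mem_append.2 (Or.inl he)
  | some dv =>
    by_cases hlt : dist.getD u 0 + pvStepDist ER EC s v < dv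
    · have heq := pvRelax_lt (q := q) hgv hlt
      rw [heq, hgetD]
      dsimp only
      have hlt' : du + pvStepDist ER EC s v < dv := by rw [hgetD] at hlt; exact hlt
      have hmain := pvInsert_mid hs H hv hvu (Or.inr ⟨dv, hgv, hlt'⟩)
      refine ⟨hmain.1, hmain.2,
        ⟨du + pvStepDist ER EC s v, PySem.Dict.get?_insert_self _ _ _, le_refl _⟩, ?_, ?_⟩
      · intro x c hx
        by_cases hxv : x = v
        · rw [hxv, hgv] at hx
          injection hx with h'
          rw [hxv, ← h']
          exact ⟨du + pvStepDist ER EC s v, PySem.Dict.get?_insert_self _ _ _, le_of_lt hlt'⟩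
        · exact ⟨c, by rw [PySem.Dict.get?_insert, if_neg hxv]; exact hx, le_refl _⟩
      · intro e he
        exact List.mem_append.2 (Or.inl he)
    · have heq := pvRelax_ge (q := q) hgv hlt
      rw [heq]
      rw [hgetD] at hlt
      exact ⟨H, le_refl _, ⟨dv, hgv, by omega⟩, fun x c hx => ⟨c, hx, le_refl _⟩, fun e he => he⟩

-- the whole neighbour fold
lemma pvFold_mid {ER EC : List Int} {s w h : Int} {g u : Int × Int} {du : Int} (hs : 0 ≤ s) :
    ∀ (l : List (Int × Int)) (dist : PySem.Dict (Int × Int) Int)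
      (q : List (Int × (Int × Int))),
      (∀ v ∈ l, v ∈ pvNbrs u w h) →
      PvMid ER EC s w h g u du dist q →
      PvMid ER EC s w h g u du (l.foldl (pvRelax ER EC s u) (dist, q)).1
          (l.foldl (pvRelax ER EC s u) (dist, q)).2 ∧
      pvMeasure s w h (l.foldl (pvRelax ER EC s u) (dist, q)).1
          (l.foldl (pvRelax ER EC s u) (dist, q)).2 ≤ pvMeasure s w h dist q ∧
      (∀ v ∈ l, ∃ c', (l.foldl (pvRelax ER EC s u) (dist, q)).1.get? v = some c' ∧
          c' ≤ du + pvStepDist ER EC s v) ∧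
      (∀ x c, dist.get? x = some c →
        ∃ c', (l.foldl (pvRelax ER EC s u) (dist, q)).1.get? x = some c' ∧ c' ≤ c) ∧
      (∀ e ∈ q, e ∈ (l.foldl (pvRelax ER EC s u) (dist, q)).2) := by
  intro l
  induction l with
  | nil =>
    intro dist q _ H
    exact ⟨H, le_refl _, by simp, fun x c hx => ⟨c, hx, le_refl _⟩, fun e he => he⟩
  | cons v0 t ih =>
    intro dist q hl H
    have hv0 : v0 ∈ pvNbrs u w h := hl v0 List.mem_cons_self
    obtain ⟨H1, hm1, ⟨cv0, hcv0, hcv0le⟩, hmono1, hsub1⟩ :=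
      pvRelax_mid hs H hv0 (pvNbrs_ne hv0)
    obtain ⟨H2, hm2, hproc2, hmono2, hsub2⟩ :=
      ih (pvRelax ER EC s u (dist, q) v0).1 (pvRelax ER EC s u (dist, q) v0).2
        (fun v hv => hl v (List.mem_cons_of_mem _ hv)) H1
    simp only [List.foldl_cons]
    refine ⟨H2, le_trans hm2 hm1, ?_, ?_, ?_⟩
    · intro v hvmem
      rcases List.mem_cons.1 hvmem with rfl | hvt
      · obtain ⟨c2, hc2, hle2⟩ := hmono2 v cv0 hcv0
        exact ⟨c2, hc2, le_trans hle2 hcv0le⟩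
      · exact hproc2 v hvt
    · intro x c hx
      obtain ⟨c1, hc1, hle1⟩ := hmono1 x c hx
      obtain ⟨c2, hc2, hle2⟩ := hmono2 x c1 hc1
      exact ⟨c2, hc2, le_trans hle2 hle1⟩
    · intro e he
      exact hsub2 e (hsub1 e he)

-- one iteration of the while loop
lemma pvIter {ER EC : List Int} {s w h : Int} {g : Int × Int}
    {dist : PySem.Dict (Int × Int) Int} {e : Int × (Int × Int)}
    {rest : List (Int × (Int × Int))}
    (hs : 0 ≤ s) (H : PvInv ER EC s w h g dist (e :: rest)) :
    PvInv ER EC s w h g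
      ((pvNbrs (pvQMin e rest).2 w h).foldl (pvRelax ER EC s (pvQMin e rest).2)
        (dist, (e :: rest).erase (pvQMin e rest))).1
      ((pvNbrs (pvQMin e rest).2 w h).foldl (pvRelax ER EC s (pvQMin e rest).2)
        (dist, (e :: rest).erase (pvQMin e rest))).2 ∧
    pvMeasure s w h
      ((pvNbrs (pvQMin e rest).2 w h).foldl (pvRelax ER EC s (pvQMin e rest).2)
        (dist, (e :: rest).erase (pvQMin e rest))).1
      ((pvNbrs (pvQMin e rest).2 w h).foldl (pvRelax ER EC s (pvQMin e rest).2)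
        (dist, (e :: rest).erase (pvQMin e rest))).2 <
      pvMeasure s w h dist (e :: rest) := by
  obtain ⟨hnd, hgz, hreach, hvalid, hqcl, hfix⟩ := H
  have hm : pvQMin e rest ∈ e :: rest := pvQMin_mem e rest
  obtain ⟨du, hdu, _⟩ := hqcl (pvQMin e rest) hm
  have Hmid : PvMid ER EC s w h g (pvQMin e rest).2 du dist
      ((e :: rest).erase (pvQMin e rest)) := by
    refine ⟨hnd, hgz, hdu, hreach, hvalid, ?_, ?_⟩
    · intro e' he'
      exact hqcl e' (List.mem_of_mem_erase he')
    · intro v c hvc hvm2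
      rcases hfix v c hvc with ⟨a, ha⟩ | hsec
      · left
        refine ⟨a, (List.mem_erase_of_ne ?_).2 ha⟩
        intro hEq
        exact hvm2 (congrArg Prod.snd hEq)
      · exact Or.inr hsec
  obtain ⟨Hf, hmf, hproc, hmono, hsub⟩ :=
    pvFold_mid hs (pvNbrs (pvQMin e rest).2 w h) dist ((e :: rest).erase (pvQMin e rest))
      (fun v hv => hv) Hmid
  constructor
  · refine ⟨Hf.nodup, Hf.gz, Hf.reach, Hf.valid, Hf.qcl, ?_⟩
    intro v c hvc
    by_cases hvm : v = (pvQMin e rest).2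
    · right
      intro v' hv'
      have hcdu : c = du := by
        have hvc' := hvc
        rw [hvm, Hf.hu] at hvc'
        injection hvc' with h'
        exact h'.symm
      obtain ⟨c', hc', hle'⟩ := hproc v' (by rw [← hvm]; exact hv')
      exact ⟨c', hc', by rw [hcdu]; exact hle'⟩
    · exact Hf.fix v c hvc hvm
  · have hlen := List.length_erase_of_mem hm
    have hsplit : pvMeasure s w h dist ((e :: rest).erase (pvQMin e rest)) + 1 =
        pvMeasure s w h dist (e :: rest) := by
      unfold pvMeasure
      simp only [List.length_cons] at hlen ⊢
      omega
    omega

-- the loop terminates inside its fuel and its result still satisfies the invariant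
lemma pvLoop_total {ER EC : List Int} {s w h : Int} {g : Int × Int} (hs : 0 ≤ s) :
    ∀ (fuel : Nat) (dist : PySem.Dict (Int × Int) Int) (q : List (Int × (Int × Int))),
      PvInv ER EC s w h g dist q → pvMeasure s w h dist q < fuel →
      ∃ d, pvLoop ER EC s w h fuel dist q = some d ∧ PvInv ER EC s w h g d [] := by
  intro fuel
  induction fuel with
  | zero =>
    intro dist q _ hm
    exact absurd hm (Nat.not_lt_zero _)
  | succ n ih =>
    intro dist q H hm
    cases q with
    | nil => exact ⟨dist, rfl, H⟩
    | cons e rest =>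
      obtain ⟨Hf, hdec⟩ := pvIter hs H
      rw [pvLoop]
      exact ih _ _ Hf (by omega)

-- at termination the dict dominates every reach cost
lemma pvFinal_le {ER EC : List Int} {s w h : Int} {g : Int × Int}
    {dist : PySem.Dict (Int × Int) Int} (H : PvInv ER EC s w h g dist []) :
    ∀ {c v}, pvReach ER EC s w h g c v → ∃ cv, dist.get? v = some cv ∧ cv ≤ c := by
  intro c v hr
  induction hr with
  | base => exact ⟨0, H.gz, le_refl 0⟩
  | @step c u v hru hv ih =>
    obtain ⟨cu, hcu, hle⟩ := ih
    rcases H.fix u cu hcu with ⟨a, ha⟩ | hfix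
    · exact absurd ha (List.not_mem_nil)
    · obtain ⟨c', hc', hle'⟩ := hfix v hv
      exact ⟨c', hc', by omega⟩

-- per-start: the Dijkstra dict returns B's formula at every admissible galaxy
lemma pvDijkstra_eq {ER EC : List Int} {s w h : Int} {g1 g2 : Int × Int}
    (hs0 : 0 ≤ s)
    (hok : g1 = g2 ∨
      (1 ≤ s ∧ pvValid w h g1 ∧ pvValid w h g2 ∧
        (s = 1 ∨ (g1.1 ∉ EC ∧ g1.2 ∉ ER)) ∧ (s = 1 ∨ (g2.1 ∉ EC ∧ g2.2 ∉ ER)))) :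
    ∃ d, pvDijkstra ER EC s w h g1 = some d ∧
      d.getD g2 0 = pvPairDist (PySem.Set.ofList ER) (PySem.Set.ofList EC) (s - 1) g1 g2 := by
  have hI0 : PvInv ER EC s w h g1 (PySem.Dict.empty.insert g1 0) [(0, g1)] := by
    refine ⟨?_, PySem.Dict.get?_insert_self _ _ _, ?_, ?_, ?_, ?_⟩
    · exact PySem.Dict.nodup_keys_insert _ _ _ PySem.Dict.nodup_keys_empty
    · intro v c hv
      rw [PySem.Dict.get?_insert] at hv
      by_cases hvg : v = g1
      · rw [if_pos hvg] at hv
        injection hv with h'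
        subst h'
        refine ⟨hvg ▸ pvReach.base, le_refl 0, ?_⟩
        have hsz : ((PySem.Dict.empty.insert g1 (0 : Int)).size : Int) = 1 := by
          rw [PySem.Dict.size_insert]
          simp [PySem.Dict.contains_empty, PySem.Dict.size_empty]
        rw [hsz]
        have : (1 : Int) ≤ max s 1 := le_max_right _ _
        omega
      · rw [if_neg hvg, PySem.Dict.get?_empty] at hv
        cases hv
    · intro v hvk
      rcases (PySem.Dict.mem_keys_insert _ _ _ _).1 hvk with rfl | hvk'
      · exact Or.inl rfl
      · rw [PySem.Dict.keys_empty] at hvk'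
        cases hvk'
    · intro e he
      rcases List.mem_singleton.1 he with rfl
      exact ⟨0, PySem.Dict.get?_insert_self _ _ _, le_refl 0⟩
    · intro v c hvc
      rw [PySem.Dict.get?_insert] at hvc
      by_cases hvg : v = g1
      · exact Or.inl ⟨0, by simp [hvg]⟩
      · rw [if_neg hvg, PySem.Dict.get?_empty] at hvc
        cases hvc
  have hmeas : pvMeasure s w h (PySem.Dict.empty.insert g1 0) [(0, g1)] <
      pvFuel s w h := by
    have hsz : (PySem.Dict.empty.insert g1 (0 : Int)).size = 1 := by
      rw [PySem.Dict.size_insert]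
      simp [PySem.Dict.contains_empty, PySem.Dict.size_empty]
    have hMv : pvMval (PySem.Dict.empty.insert g1 (0 : Int)) = 0 := by
      rw [pvMval_insert_new (PySem.Dict.contains_empty _)]
      simp [pvMval, PySem.Dict.values, PySem.Dict.empty]
    unfold pvMeasure pvFuel
    rw [hsz, hMv]
    have hmul : (w.toNat * h.toNat + 1 - 1) * ((w.toNat * h.toNat + 1) * (s.toNat + 1) + 2) ≤
        ((w.toNat * h.toNat + 1) * (s.toNat + 1) + 2) * (w.toNat * h.toNat + 1) := by
      rw [Nat.mul_comm]
      exact Nat.mul_le_mul_left _ (by omega)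
    simp only [List.length_cons, List.length_nil]
    omega
  obtain ⟨d, hloop, Hfin⟩ := pvLoop_total hs0 (pvFuel s w h) _ _ hI0 hmeas
  refine ⟨d, hloop, ?_⟩
  rcases hok with rfl | ⟨hs, h1, h2, ho1, ho2⟩
  · rw [PySem.Dict.getD_of_get?_eq_some _ 0 Hfin.gz, pvPairDist_self]
  · have hy1 : s = 1 ∨ g1.2 ∉ ER := ho1.imp id And.right
    have hx2 : s = 1 ∨ g2.1 ∉ EC := ho2.imp id And.left
    have hreachF := pvReach_phi (ER := ER) (EC := EC) hs h1 h2 hy1 hx2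
    obtain ⟨cv, hcv, hcvle⟩ := pvFinal_le Hfin hreachF
    have hlow : pvPhi ER EC s g1 g2 ≤ cv := pvPhi_le_reach hs (Hfin.reach g2 cv hcv).1
    have hcveq : cv = pvPhi ER EC s g1 g2 := le_antisymm hcvle hlow
    rw [PySem.Dict.getD_of_get?_eq_some _ 0 hcv, hcveq,
      pvPairDist_eq_phi (s := s) ho2]

-- a cell with no in-grid neighbour: the Dijkstra loop stops after one iteration
lemma pvDijkstra_isolated {ER EC : List Int} {s w h : Int} {g : Int × Int}
    (hnn : pvNoNbr w h g) :
    pvDijkstra ER EC s w h g = some (PySem.Dict.empty.insert g 0) := by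
  have hnb : pvNbrs g w h = [] := by
    obtain ⟨n1, n2, n3, n4⟩ := hnn
    unfold pvNbrs
    rw [List.filter_eq_nil_iff]
    intro v hv
    simp only [List.mem_cons, List.not_mem_nil, or_false] at hv
    rcases hv with rfl | rfl | rfl | rfl <;> simp_all [pvValid]
  have hk : pvFuel s w h = (pvFuel s w h - 2) + 1 + 1 := by
    unfold pvFuel
    omega
  unfold pvDijkstra
  rw [hk, pvLoop]
  have hqm : pvQMin (0, g) [] = (0, g) := rfl
  rw [hqm, hnb]
  simp [pvLoop]
-- ===== VERDICT (by name: the statement is the Claim_ definition above) =====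
theorem find_galaxy_distances_spec : Claim_equal_find_galaxy_distances := by
  intro galaxies ER EC s w h _hDom hPre
  unfold Spec_find_galaxy_distances
  rcases hPre with rfl | ⟨hall, hiso⟩ | ⟨hs, hgrid, hsub⟩
  · rfl
  · -- all galaxies at one position: every distance is dist[g] = 0 = B's formula at (g, g)
    unfold find_galaxy_distances find_galaxy_distances_alt
    dsimp only
    refine PySem.List.foldl_congr_mem _ _ _ _ ?_
    intro acc g1 hg1
    have key : ∃ d, pvDijkstra ER EC s w h g1 = some d ∧ d.getD g1 0 = 0 := by
      rcases hiso with hs0 | hnn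
      · obtain ⟨d, hd, hval⟩ := pvDijkstra_eq (g2 := g1) (ER := ER) (EC := EC) hs0 (Or.inl rfl)
        exact ⟨d, hd, by rw [hval, pvPairDist_self]⟩
      · refine ⟨_, pvDijkstra_isolated (ER := ER) (EC := EC) (s := s) (hnn g1 hg1), ?_⟩
        exact PySem.Dict.getD_of_get?_eq_some _ 0 (PySem.Dict.get?_insert_self _ _ _)
    obtain ⟨d, hd, hval⟩ := key
    rw [hd]
    dsimp only
    congr 1
    refine List.map_congr_left ?_
    intro g2 hg2
    have hEq : g1 = g2 := hall g1 hg1 g2 hg2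
    rw [← hEq, hval, pvPairDist_self]
  · -- the formula path: scale ≥ 1, galaxies in-grid, and s = 1 or no galaxy on an empty line
    unfold find_galaxy_distances find_galaxy_distances_alt
    dsimp only
    refine PySem.List.foldl_congr_mem _ _ _ _ ?_
    intro acc g1 hg1
    have hok : ∀ g2 ∈ galaxies, g1 = g2 ∨
        (1 ≤ s ∧ pvValid w h g1 ∧ pvValid w h g2 ∧
          (s = 1 ∨ (g1.1 ∉ EC ∧ g1.2 ∉ ER)) ∧ (s = 1 ∨ (g2.1 ∉ EC ∧ g2.2 ∉ ER))) := by
      intro g2 hg2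
      rcases hsub with hs1 | hoff
      · exact Or.inr ⟨hs, hgrid g1 hg1, hgrid g2 hg2, Or.inl hs1, Or.inl hs1⟩
      · exact Or.inr ⟨hs, hgrid g1 hg1, hgrid g2 hg2,
          Or.inr (hoff g1 hg1), Or.inr (hoff g2 hg2)⟩
    obtain ⟨d, hd, _⟩ := pvDijkstra_eq (g2 := g1) (by omega : (0:Int) ≤ s) (Or.inl rfl)
    rw [hd]
    dsimp only
    congr 1
    refine List.map_congr_left ?_
    intro g2 hg2
    obtain ⟨d', hd', hval⟩ :=
      pvDijkstra_eq (g2 := g2) (by omega : (0:Int) ≤ s) (hok g2 hg2)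
    rw [hd'] at hd
    cases hd
    exact hval
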